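-- pv_equiv track=rewrite | github.com/okonp07/churn-prediction-system | app/services/explainer.py | _base_feature_name
-- ===== SOURCE A (Python) =====
-- def _base_feature_name(transformed_name: str) -> str:
--     stripped = transformed_name.split("__", 1)[-1]
--     prefixes = [
--         "gender",
--         "region_category",
--         "membership_category",
--         "joined_through_referral",
--         "preferred_offer_types",
--         "medium_of_operation",
--         "internet_option",
--         "used_special_discount",
--         "offer_application_preference",
--         "past_complaint",
--         "complaint_status",
--         "feedback",
--         "customer_tenure_bucket",
--         "visit_time_segment",
--         "engagement_segment",
--         "spend_segment",
--     ]
--     for prefix in sorted(prefixes, key=len, reverse=True):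
--         if stripped == prefix or stripped.startswith(prefix + "_"):
--             return prefix
--     return stripped
-- ===== SOURCE B (Python) =====
-- _KNOWN_PREFIXES = frozenset({
--     "gender",
--     "region_category",
--     "membership_category",
--     "joined_through_referral",
--     "preferred_offer_types",
--     "medium_of_operation",
--     "internet_option",
--     "used_special_discount",
--     "offer_application_preference",
--     "past_complaint",
--     "complaint_status",
--     "feedback",
--     "customer_tenure_bucket",
--     "visit_time_segment",
--     "engagement_segment",
--     "spend_segment",
-- })
--
--
-- def _base_feature_name(transformed_name: str) -> str:
--     # Single left-to-right scan: at every underscore boundary, test the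
--     # accumulated prefix against the known-prefix set; no per-prefix startswith.
--     stripped = transformed_name.split("__", 1)[-1]
--     candidate = ""
--     for ch in stripped:
--         if ch == "_" and candidate in _KNOWN_PREFIXES:
--             return candidate
--         candidate += ch
--     return stripped
-- ===== Notes on version B (the rewrite author's own statement) =====
-- stated objective: alternative
-- what changed: A scans the 16 known prefixes sorted by length (descending) and tests each with == / startswith; B scans the stripped name once, character by character, and at each underscore boundary tests the accumulated candidate prefix against a frozenset of the known prefixes.
import Mathlib
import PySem

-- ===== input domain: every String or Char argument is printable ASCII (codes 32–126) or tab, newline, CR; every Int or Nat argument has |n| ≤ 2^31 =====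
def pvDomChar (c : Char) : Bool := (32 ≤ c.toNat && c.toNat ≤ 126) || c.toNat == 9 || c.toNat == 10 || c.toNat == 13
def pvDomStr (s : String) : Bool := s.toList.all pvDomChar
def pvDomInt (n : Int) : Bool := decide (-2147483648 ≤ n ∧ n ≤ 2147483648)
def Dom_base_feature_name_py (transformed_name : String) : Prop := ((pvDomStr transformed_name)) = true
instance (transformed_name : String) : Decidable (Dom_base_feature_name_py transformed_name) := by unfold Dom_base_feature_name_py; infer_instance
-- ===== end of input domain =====

-- B replaces A's scan of 16 startswith-tested prefixes (sorted longest-first) by one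
-- left-to-right character scan of the input that tests each underscore-boundary prefix
-- against a frozenset of the known prefixes (objective: alternative decomposition).


-- ===== PORT A =====
-- The 16 prefixes literal, in A's source order.
def pvPrefixes : List String :=
  ["gender", "region_category", "membership_category", "joined_through_referral",
   "preferred_offer_types", "medium_of_operation", "internet_option",
   "used_special_discount", "offer_application_preference", "past_complaint",
   "complaint_status", "feedback", "customer_tenure_bucket", "visit_time_segment",
   "engagement_segment", "spend_segment"]

-- A's loop condition: stripped == prefix or stripped.startswith(prefix + "_") (on code points).
def pvCondA (s : List Char) (p : String) : Bool :=
  s == p.toList || PySem.Chars.startswith s (p.toList ++ ['_'])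

-- A's for-loop with early return.
def pvLoopA (stripped : String) : List String → String
  | [] => stripped
  | p :: rest => if pvCondA stripped.toList p then p else pvLoopA stripped rest

def base_feature_name_py (transformed_name : String) : String :=
  let stripped := (PySem.List.pyGet? ((PySem.Str.splitMax? transformed_name "__" 1).getD []) (-1)).getD ""
  pvLoopA stripped (PySem.List.sorted pvPrefixes (fun p => PySem.Str.len p) true)

-- ===== PORT B =====
-- B's frozenset of known prefixes (elements as code-point lists).
def pvKnown : PySem.Set (List Char) := PySem.Set.ofList (pvPrefixes.map String.toList)

-- B's for-loop over the characters of stripped, accumulating the candidate;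
-- returns some candidate on the early `return`, none when the loop falls through.
def pvLoopB (cand : List Char) : List Char → Option (List Char)
  | [] => none
  | ch :: rest =>
      if ch == '_' && PySem.Set.contains pvKnown cand then some cand
      else pvLoopB (cand ++ [ch]) rest

def base_feature_name_py_alt (transformed_name : String) : String :=
  let stripped := (PySem.List.pyGet? ((PySem.Str.splitMax? transformed_name "__" 1).getD []) (-1)).getD ""
  match pvLoopB [] stripped.toList with
  | some c => String.ofList c
  | none => stripped

-- ===== PRECONDITION & SPEC =====
def Spec_base_feature_name_py (transformed_name : String) (out : String) : Prop := out = base_feature_name_py_alt transformed_name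
instance (transformed_name : String) (out : String) : Decidable (Spec_base_feature_name_py transformed_name out) := by unfold Spec_base_feature_name_py; infer_instance

-- ===== CLAIM (what is proved, stated in full; the proofs are below) =====
def Claim_equal_base_feature_name_py : Prop := ∀ (transformed_name : String), Dom_base_feature_name_py transformed_name → Spec_base_feature_name_py transformed_name (base_feature_name_py transformed_name)

-- ===== LEMMAS AND PROOFS =====

-- "p matches s" in A's sense, at the level of char lists.
def pvBP (s c : List Char) : Prop := s = c ∨ (c ++ ['_']) <+: s

theorem pvCondA_iff (s : List Char) (p : String) :
    pvCondA s p = true ↔ pvBP s p.toList := by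
  simp [pvCondA, pvBP, PySem.Chars.startswith_iff]

theorem pvBP_prefix {s c : List Char} (h : pvBP s c) : c <+: s := by
  rcases h with h | h
  · exact h ▸ List.prefix_refl c
  · exact (List.prefix_append c ['_']).trans h

-- No known prefix, extended by '_', is a prefix of another known prefix.
theorem pvPW : ∀ c ∈ pvPrefixes.map String.toList, ∀ d ∈ pvPrefixes.map String.toList,
    c = d ∨ ¬ ((c ++ ['_']) <+: d) := by decide

theorem pvNoLt {s c d : List Char}
    (hc : c ∈ pvPrefixes.map String.toList) (hd : d ∈ pvPrefixes.map String.toList)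
    (hbc : pvBP s c) (hbd : pvBP s d) (hlt : c.length < d.length) : False := by
  have hds : d <+: s := pvBP_prefix hbd
  have hstrict : (c ++ ['_']) <+: s := by
    rcases hbc with h | h
    · exfalso; have h1 := hds.length_le; rw [← h] at hlt; omega
    · exact h
  have hcd : (c ++ ['_']) <+: d := by
    refine List.prefix_of_prefix_length_le hstrict hds ?_
    simp; omega
  rcases pvPW c hc d hd with h | h
  · subst h; omega
  · exact h hcd

theorem pvUniq {s c d : List Char}
    (hc : c ∈ pvPrefixes.map String.toList) (hd : d ∈ pvPrefixes.map String.toList)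
    (hbc : pvBP s c) (hbd : pvBP s d) : c = d := by
  rcases lt_trichotomy c.length d.length with h | h | h
  · exact (pvNoLt hc hd hbc hbd h).elim
  · exact (List.prefix_of_prefix_length_le (pvBP_prefix hbc) (pvBP_prefix hbd) h.le).eq_of_length h
  · exact (pvNoLt hd hc hbd hbc h).elim

theorem pvLoopB_cons (cand : List Char) (ch : Char) (rest : List Char) :
    pvLoopB cand (ch :: rest) =
      if ch == '_' && PySem.Set.contains pvKnown cand then some cand
      else pvLoopB (cand ++ [ch]) rest := rfl

theorem pvToList_inj {p q : String} (h : p.toList = q.toList) : p = q := by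
  rw [← String.ofList_toList (s := p), h, String.ofList_toList]

theorem pvContains_iff (c : List Char) :
    PySem.Set.contains pvKnown c = true ↔ c ∈ pvPrefixes.map String.toList := by
  rw [PySem.Set.contains_iff, pvKnown, PySem.Set.mem_ofList]

-- A's loop returns stripped when no prefix matches.
theorem pvLoopA_none (stripped : String) :
    ∀ lst, (∀ p ∈ lst, pvCondA stripped.toList p = false) → pvLoopA stripped lst = stripped := by
  intro lst
  induction lst with
  | nil => intro _; rfl
  | cons q rest ih =>
      intro h
      simp [pvLoopA, h q (by simp)]
      exact ih fun p hp => h p (by simp [hp])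

-- A's loop returns the (unique) matching prefix when one matches.
theorem pvLoopA_find (stripped p0 : String) :
    ∀ lst, p0 ∈ lst → (∀ p ∈ lst, p ∈ pvPrefixes) → pvCondA stripped.toList p0 = true →
      pvLoopA stripped lst = p0 := by
  intro lst
  induction lst with
  | nil => intro h; simp at h
  | cons q rest ih =>
      intro hmem hsub hcond
      by_cases hq : pvCondA stripped.toList q = true
      · have hqeq : q = p0 := by
          apply pvToList_inj
          exact pvUniq (List.mem_map_of_mem (hsub q (by simp)))
            (List.mem_map_of_mem (hsub p0 hmem))
            ((pvCondA_iff _ _).mp hq) ((pvCondA_iff _ _).mp hcond)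
        subst hqeq
        simp [pvLoopA, hq]
      · have hne : p0 ≠ q := fun h => hq (h ▸ hcond)
        have : p0 ∈ rest := by
          rcases List.mem_cons.mp hmem with h | h
          · exact absurd h hne
          · exact h
        simp [pvLoopA, hq]
        exact ih this (fun p hp => hsub p (by simp [hp])) hcond

-- B's loop falls through when no known prefix occurs at an underscore boundary.
theorem pvLoopB_none (s : List Char)
    (hno : ∀ c ∈ pvPrefixes.map String.toList, ¬ ((c ++ ['_']) <+: s)) :
    ∀ rest acc, s = acc ++ rest → pvLoopB acc rest = none := by
  intro rest
  induction rest with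
  | nil => intro _ _; rfl
  | cons ch rest ih =>
      intro acc hs
      by_cases hcond : (ch == '_' && PySem.Set.contains pvKnown acc) = true
      · exfalso
        have h1 : ch = '_' := by
          have := (Bool.and_eq_true _ _).mp hcond |>.1
          exact beq_iff_eq.mp this
        have h2 : acc ∈ pvPrefixes.map String.toList :=
          (pvContains_iff acc).mp ((Bool.and_eq_true _ _).mp hcond).2
        refine hno acc h2 ?_
        rw [hs, h1]
        exact ⟨rest, by simp⟩
      · rw [pvLoopB_cons, if_neg hcond]
        exact ih (acc ++ [ch]) (by simp [hs])

-- B's loop returns the (unique) known prefix at an underscore boundary.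
theorem pvLoopB_find (s c0 : List Char)
    (hc0 : c0 ∈ pvPrefixes.map String.toList) (hpre : (c0 ++ ['_']) <+: s) :
    ∀ rest acc, s = acc ++ rest → acc.length ≤ c0.length → pvLoopB acc rest = some c0 := by
  intro rest
  induction rest with
  | nil =>
      intro acc hs hlen
      exfalso
      have := hpre.length_le
      simp [hs] at this
      omega
  | cons ch rest ih =>
      intro acc hs hlen
      by_cases hcond : (ch == '_' && PySem.Set.contains pvKnown acc) = true
      · have h1 : ch = '_' := beq_iff_eq.mp ((Bool.and_eq_true _ _).mp hcond).1
        have h2 : acc ∈ pvPrefixes.map String.toList :=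
          (pvContains_iff acc).mp ((Bool.and_eq_true _ _).mp hcond).2
        have hbacc : pvBP s acc := Or.inr (by rw [hs, h1]; exact ⟨rest, by simp⟩)
        have heq : acc = c0 := pvUniq h2 hc0 hbacc (Or.inr hpre)
        subst heq
        rw [pvLoopB_cons, if_pos hcond]
      · rw [pvLoopB_cons, if_neg hcond]
        have haccs : acc <+: s := by rw [hs]; exact ⟨ch :: rest, rfl⟩
        have hc0s : c0 <+: s := pvBP_prefix (Or.inr hpre)
        have hlt : acc.length < c0.length := by
          rcases Nat.lt_or_ge acc.length c0.length with h | h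
          · exact h
          · exfalso
            have heq : acc = c0 :=
              (List.prefix_of_prefix_length_le haccs hc0s (Nat.le_antisymm hlen h).le).eq_of_length
                (Nat.le_antisymm hlen h)
            subst heq
            have hch : ch = '_' := by
              obtain ⟨t, ht⟩ := hpre
              rw [hs] at ht
              have := List.append_cancel_left (by simpa using ht.symm : acc ++ (ch :: rest) = acc ++ ('_' :: t))
              exact (List.cons_eq_cons.mp this).1
            apply hcond
            rw [hch]
            simp only [beq_self_eq_true, Bool.true_and]
            exact (pvContains_iff acc).mpr hc0
        exact ih (acc ++ [ch]) (by simp [hs]) (by simp; omega)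

-- Core equivalence on any stripped string.
theorem pvCore (stripped : String) :
    pvLoopA stripped (PySem.List.sorted pvPrefixes (fun p => PySem.Str.len p) true)
      = match pvLoopB [] stripped.toList with
        | some c => String.ofList c
        | none => stripped := by
  have hmem : ∀ p ∈ PySem.List.sorted pvPrefixes (fun p => PySem.Str.len p) true, p ∈ pvPrefixes :=
    fun p hp => (PySem.List.mem_sorted _ _ _ _).mp hp
  have hmem' : ∀ p ∈ pvPrefixes, p ∈ PySem.List.sorted pvPrefixes (fun p => PySem.Str.len p) true :=
    fun p hp => (PySem.List.mem_sorted _ _ _ _).mpr hp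
  by_cases hex : ∃ c ∈ pvPrefixes.map String.toList, (c ++ ['_']) <+: stripped.toList
  · obtain ⟨c0, hc0, hp0⟩ := hex
    rw [pvLoopB_find stripped.toList c0 hc0 hp0 stripped.toList [] (by simp) (by simp)]
    obtain ⟨p0, hp0mem, rfl⟩ := List.mem_map.mp hc0
    rw [pvLoopA_find stripped p0 _ (hmem' _ hp0mem) hmem ((pvCondA_iff _ _).mpr (Or.inr hp0))]
    exact String.ofList_toList.symm
  · push_neg at hex
    rw [pvLoopB_none stripped.toList hex stripped.toList [] rfl]
    by_cases hA : ∃ p ∈ PySem.List.sorted pvPrefixes (fun p => PySem.Str.len p) true,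
        pvCondA stripped.toList p = true
    · obtain ⟨p0, hp0l, hcond⟩ := hA
      rcases (pvCondA_iff _ _).mp hcond with heq | hstr
      · rw [pvLoopA_find stripped p0 _ hp0l hmem hcond]
        exact (pvToList_inj heq).symm
      · exact absurd hstr (hex _ (List.mem_map_of_mem (hmem p0 hp0l)))
    · push_neg at hA
      exact pvLoopA_none stripped _ fun p hp => by
        simpa using hA p hp

-- ===== VERDICT (by name: the statement is the Claim_ definition above) =====
theorem base_feature_name_py_spec : Claim_equal_base_feature_name_py := by
  intro t _
  unfold Spec_base_feature_name_py base_feature_name_py base_feature_name_py_alt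
  exact pvCore _
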